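-- pv_equiv track=rewrite | github.com/arunachaladevaraj/Used-Car-Price-Prediction | scripts/preprocess.py | convert_overview_to_structured
-- ===== SOURCE A (Python) =====
-- def convert_overview_to_structured(overview_data):
--     top_overview = {item['key']: item['value'] for item in overview_data.get('top', [])}
--     structured_overview = {
--         'Registration Year': top_overview.get('Registration Year', None),
--         'Insurance Validity': top_overview.get('Insurance Validity', None),
--         'Fuel Type': top_overview.get('Fuel Type', None),
--         'Seats': top_overview.get('Seats', None),
--         'Kms Driven': top_overview.get('Kms Driven', None),
--         'RTO': top_overview.get('RTO', None),
--         'Ownership': top_overview.get('Ownership', None),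
--         'Engine Displacement': top_overview.get('Engine Displacement', None),
--         'Transmission': top_overview.get('Transmission', None),
--         'Year of Manufacture': top_overview.get('Year of Manufacture', None)
--     }
--     return structured_overview
-- ===== SOURCE B (Python) =====
-- _TARGET_KEYS = (
--     'Registration Year', 'Insurance Validity', 'Fuel Type', 'Seats',
--     'Kms Driven', 'RTO', 'Ownership', 'Engine Displacement',
--     'Transmission', 'Year of Manufacture',
-- )
--
--
-- def _last_value(items, wanted):
--     # last occurrence wins, like a dict comprehension with duplicate keys
--     for item in reversed(items):
--         if item['key'] == wanted:
--             return item['value']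
--     return None
--
--
-- def convert_overview_to_structured(overview_data):
--     top = overview_data.get('top', [])
--     return {k: _last_value(top, k) for k in _TARGET_KEYS}
-- ===== Notes on version B (the rewrite author's own statement) =====
-- stated objective: alternative
-- what changed: B builds no dictionary at all: for each of the ten fixed keys it scans the 'top' list backwards for the last matching entry (last occurrence wins, matching dict-comprehension semantics), instead of A's single dict-accumulating pass followed by ten .get calls.
import Mathlib
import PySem

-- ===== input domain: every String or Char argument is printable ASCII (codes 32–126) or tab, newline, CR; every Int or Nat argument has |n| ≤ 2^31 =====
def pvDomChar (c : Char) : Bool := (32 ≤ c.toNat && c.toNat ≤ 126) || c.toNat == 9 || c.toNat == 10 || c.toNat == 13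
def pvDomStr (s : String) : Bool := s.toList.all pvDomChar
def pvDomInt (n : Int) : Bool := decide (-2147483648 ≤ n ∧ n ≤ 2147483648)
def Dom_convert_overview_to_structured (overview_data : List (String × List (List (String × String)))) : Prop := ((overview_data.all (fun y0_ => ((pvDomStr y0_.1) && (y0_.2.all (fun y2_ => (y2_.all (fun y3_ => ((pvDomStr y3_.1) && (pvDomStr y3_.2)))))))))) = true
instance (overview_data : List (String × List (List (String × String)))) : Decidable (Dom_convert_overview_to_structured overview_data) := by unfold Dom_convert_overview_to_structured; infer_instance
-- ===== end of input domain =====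

-- B builds no dictionary: for each of the ten fixed keys it scans the 'top' list
-- backwards for the last matching entry (objective: alternative algorithm).

-- ===== PORT A =====
-- item['key'] / item['value'] raise KeyError when the key is absent; Pre_ excludes
-- those inputs, so the "" defaults below are never reached on admitted inputs.
def convert_overview_to_structured (overview_data : List (String × List (List (String × String)))) : List (String × Option String) :=
  let top_overview : PySem.Dict String String :=
    (PySem.Dict.getD (PySem.Dict.mk overview_data) "top" []).foldl
      (fun d item =>
        d.insert ((PySem.Dict.mk item).getD "key" "") ((PySem.Dict.mk item).getD "value" ""))
      PySem.Dict.empty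
  [("Registration Year", top_overview.get? "Registration Year"),
   ("Insurance Validity", top_overview.get? "Insurance Validity"),
   ("Fuel Type", top_overview.get? "Fuel Type"),
   ("Seats", top_overview.get? "Seats"),
   ("Kms Driven", top_overview.get? "Kms Driven"),
   ("RTO", top_overview.get? "RTO"),
   ("Ownership", top_overview.get? "Ownership"),
   ("Engine Displacement", top_overview.get? "Engine Displacement"),
   ("Transmission", top_overview.get? "Transmission"),
   ("Year of Manufacture", top_overview.get? "Year of Manufacture")]

-- ===== PORT B =====
def pvTargetKeys : List String :=
  ["Registration Year", "Insurance Validity", "Fuel Type", "Seats",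
   "Kms Driven", "RTO", "Ownership", "Engine Displacement",
   "Transmission", "Year of Manufacture"]

-- Source B's _last_value: loop over reversed(items), return the first match's value
def pvLastValue (items : List (List (String × String))) (wanted : String) : Option String :=
  match items.reverse.find? (fun item => (PySem.Dict.mk item).getD "key" "" == wanted) with
  | some item => some ((PySem.Dict.mk item).getD "value" "")
  | none => none

def convert_overview_to_structured_alt (overview_data : List (String × List (List (String × String)))) : List (String × Option String) :=
  let top := PySem.Dict.getD (PySem.Dict.mk overview_data) "top" []
  pvTargetKeys.map (fun k => (k, pvLastValue top k))

-- ===== PRECONDITION & SPEC =====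
-- Pre_ excludes inputs where some entry of overview_data['top'] lacks the key
-- 'key' or 'value': there Python A raises KeyError.
def Pre_convert_overview_to_structured (overview_data : List (String × List (List (String × String)))) : Prop :=
  ∀ item ∈ PySem.Dict.getD (PySem.Dict.mk overview_data) "top" [],
    ((PySem.Dict.mk item).get? "key").isSome ∧ ((PySem.Dict.mk item).get? "value").isSome
instance (overview_data : List (String × List (List (String × String)))) : Decidable (Pre_convert_overview_to_structured overview_data) := by unfold Pre_convert_overview_to_structured; infer_instance

def pvWitness_convert_overview_to_structured : (List (String × List (List (String × String)))) :=
  [("top", [[("key", "Fuel Type"), ("value", "Petrol")], [("key", "Color"), ("value", "Red")]])]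

def Spec_convert_overview_to_structured (overview_data : List (String × List (List (String × String)))) (out : List (String × Option String)) : Prop := out = convert_overview_to_structured_alt overview_data
instance (overview_data : List (String × List (List (String × String)))) (out : List (String × Option String)) : Decidable (Spec_convert_overview_to_structured overview_data out) := by unfold Spec_convert_overview_to_structured; infer_instance

-- ===== CLAIM (what is proved, stated in full; the proofs are below) =====
def Claim_equal_convert_overview_to_structured : Prop := ∀ (overview_data : List (String × List (List (String × String)))), Dom_convert_overview_to_structured overview_data → Pre_convert_overview_to_structured overview_data → Spec_convert_overview_to_structured overview_data (convert_overview_to_structured overview_data)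

-- ===== LEMMAS AND PROOFS =====

-- A's accumulating fold, looked up at k, is the last occurrence of k (or the start dict's value)
lemma pvFold_get (items : List (List (String × String))) (d : PySem.Dict String String) (k : String) :
    (items.foldl
      (fun d item =>
        d.insert ((PySem.Dict.mk item).getD "key" "") ((PySem.Dict.mk item).getD "value" ""))
      d).get? k =
    match items.reverse.find? (fun item => (PySem.Dict.mk item).getD "key" "" == k) with
    | some item => some ((PySem.Dict.mk item).getD "value" "")
    | none => d.get? k := by
  induction items generalizing d with
  | nil => simp
  | cons item rest ih =>
    rw [List.foldl_cons, ih]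
    rw [List.reverse_cons, List.find?_append]
    cases hfind : rest.reverse.find? (fun item => (PySem.Dict.mk item).getD "key" "" == k) with
    | some it => simp
    | none =>
      simp only [Option.none_or]
      by_cases hk : (PySem.Dict.mk item).getD "key" "" = k
      · simp [List.find?, hk, PySem.Dict.get?_insert_self]
      · have hb : (((PySem.Dict.mk item).getD "key" "") == k) = false := beq_eq_false_iff_ne.mpr hk
        simp [List.find?, hb, PySem.Dict.get?_insert_of_ne _ _ (fun h => hk h.symm)]

-- ===== VERDICT (by name: the statement is the Claim_ definition above) =====
theorem convert_overview_to_structured_spec : Claim_equal_convert_overview_to_structured := by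
  intro od _ _
  unfold Spec_convert_overview_to_structured convert_overview_to_structured convert_overview_to_structured_alt
  simp only [pvLastValue, pvFold_get, PySem.Dict.get?_empty, pvTargetKeys, List.map]
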